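-- pv_equiv track=rewrite | github.com/mincastle98/Algorithm | Kakao/NGame.py | solution
-- ===== SOURCE A (Python) =====
-- def convertFormat(n, type):
--     answer = []
--     while n > 0:
--         tmp = n % type
--         if tmp >= 10:
--             answer.append(chr(55 + tmp))
--         else:
--             answer.append(tmp)
--         n //= type
--     if answer:
--         return reversed(answer)
--     else:
--         return [0]
--
-- def solution(n, t, m, p):
--     answer = ''
--     num = 0
--     player = 0
--     while len(answer) < t:
--         tmp = convertFormat(num, n)
--         for i in tmp:
--             if player % m == p - 1:
--                 answer += str(i)
--                 if len(answer) == t: break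
--             player += 1
--         num += 1
--     return answer
-- ===== SOURCE B (Python) =====
-- # Closed-form digit extraction: for each of the t requested positions, locate the
-- # base-n number and digit directly by block-length counting (no digit-stream simulation).
--
-- def _digit_at(n, g):
--     # digit of the infinite concatenation 0,1,2,... in base n at global index g
--     d = 1        # current digit-length block
--     start = 0    # total digits contributed by all shorter blocks
--     first = 0    # first number having d digits
--     count = n    # how many numbers have d digits
--     while g >= start + count * d:
--         start += count * d
--         first += count
--         count = first * (n - 1)
--         d += 1
--     i = g - start
--     num = first + i // d
--     pos = i % d
--     digit = (num // n ** (d - 1 - pos)) % n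
--     return str(digit) if digit < 10 else chr(55 + digit)
--
-- def solution(n, t, m, p):
--     out = []
--     for k in range(t):
--         out.append(_digit_at(n, (p - 1) + k * m))
--     return ''.join(out)
-- ===== Notes on version B (the rewrite author's own statement) =====
-- stated objective: faster
-- what changed: A simulates the whole concatenated base-n digit stream, stepping a counter over every one of the ~t*m digits and filtering; B computes each of the t requested digits directly, locating its number and digit position by a block-length counting formula over the digit-length blocks.
-- outside the precondition, e.g. on solution(10, 3, -3, 0): A returns '258', B returns '963'; on solution(0, 1, 5, 1): A returns '0', B does not finish within the time limit
import Mathlib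
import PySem

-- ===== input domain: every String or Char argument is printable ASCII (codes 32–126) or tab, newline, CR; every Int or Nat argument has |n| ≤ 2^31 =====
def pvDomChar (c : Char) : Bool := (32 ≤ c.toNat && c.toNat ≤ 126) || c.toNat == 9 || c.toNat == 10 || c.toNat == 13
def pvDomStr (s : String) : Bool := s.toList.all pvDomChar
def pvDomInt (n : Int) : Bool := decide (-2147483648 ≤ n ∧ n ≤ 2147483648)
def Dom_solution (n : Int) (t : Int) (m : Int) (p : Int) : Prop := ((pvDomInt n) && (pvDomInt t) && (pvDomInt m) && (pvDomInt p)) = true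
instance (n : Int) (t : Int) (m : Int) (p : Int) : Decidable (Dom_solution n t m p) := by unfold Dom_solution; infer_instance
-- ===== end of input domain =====

-- B replaces A's digit-by-digit simulation of the concatenated base-n stream by a direct
-- closed-form computation of the digit at each requested global index (block counting);
-- objective: faster (O(t·log) digit lookups instead of scanning all t·m stream digits).

-- ===== PORT A =====
-- convertFormat's list holds ints (digit < 10) or chars (chr(55+digit)); ported as Int ⊕ Char.
def pvEnc (tmp : Int) : Int ⊕ Char :=
  if tmp ≥ 10 then Sum.inr (Char.ofNat (55 + tmp).toNat) else Sum.inl tmp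

-- 'while n > 0' of convertFormat; fuel n.toNat+1 suffices whenever type ≥ 2 (Pre_ cases)
def pvCfLoop : Nat → Int → Int → List (Int ⊕ Char) → List (Int ⊕ Char)
  | 0, _, _, acc => acc
  | fuel + 1, nn, ty, acc =>
    if 0 < nn then
      pvCfLoop fuel (PySem.Int.floordiv nn ty) ty (acc ++ [pvEnc (PySem.Int.mod nn ty)])
    else acc

def pvConvertFormat (nn ty : Int) : List (Int ⊕ Char) :=
  let answer := pvCfLoop (nn.toNat + 1) nn ty []
  if answer ≠ [] then answer.reverse else [Sum.inl 0]

-- str(i) for a convertFormat element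
def pvStrOf : Int ⊕ Char → List Char
  | Sum.inl i => PySem.Int.toChars i
  | Sum.inr c => [c]

-- 'for i in tmp: …' with the break; returns (answer, player); on break player is not incremented
def pvInner (m p t : Int) : List (Int ⊕ Char) → List Char → Int → List Char × Int
  | [], answer, player => (answer, player)
  | i :: rest, answer, player =>
    if PySem.Int.mod player m = p - 1 then
      let answer' := answer ++ pvStrOf i
      if (answer'.length : Int) = t then (answer', player)
      else pvInner m p t rest answer' (player + 1)
    else pvInner m p t rest answer (player + 1)

-- 'while len(answer) < t'; fuel t.toNat*m.toNat+2 suffices whenever A terminates (Pre_ cases)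
def pvOuter (n m p t : Int) : Nat → Int → List Char → Int → List Char
  | 0, _, answer, _ => answer
  | fuel + 1, num, answer, player =>
    if (answer.length : Int) < t then
      let st := pvInner m p t (pvConvertFormat num n) answer player
      pvOuter n m p t fuel (num + 1) st.1 st.2
    else answer

def solution (n : Int) (t : Int) (m : Int) (p : Int) : String :=
  String.ofList (pvOuter n m p t (t.toNat * m.toNat + 2) 0 [] 0)

-- ===== PORT B =====
-- the block-finding 'while g >= start + count * d' loop of _digit_at; state (d, start, first, count);
-- fuel g.toNat+2 suffices whenever n ≥ 2 and g ≥ 0 (the only calls made under Pre_)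
def pvDigitLoop (n g : Int) : Nat → Int → Int → Int → Int → Int × Int × Int × Int
  | 0, d, start, first, count => (d, start, first, count)
  | fuel + 1, d, start, first, count =>
    if g ≥ start + count * d then
      pvDigitLoop n g fuel (d + 1) (start + count * d) (first + count) ((first + count) * (n - 1))
    else (d, start, first, count)

def pvDigitAt (n g : Int) : List Char :=
  let s := pvDigitLoop n g (g.toNat + 2) 1 0 0 n
  let d := s.1
  let start := s.2.1
  let first := s.2.2.1
  let i := g - start
  let num := first + PySem.Int.floordiv i d
  let pos := PySem.Int.mod i d
  let digit := PySem.Int.mod (PySem.Int.floordiv num (n ^ (d - 1 - pos).toNat)) n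
  if digit < 10 then PySem.Int.toChars digit else [Char.ofNat (55 + digit).toNat]

def solution_alt (n : Int) (t : Int) (m : Int) (p : Int) : String :=
  String.ofList (((PySem.List.pyRange 0 t 1).map (fun k => pvDigitAt n ((p - 1) + k * m))).flatten)

-- ===== PRECONDITION & SPEC =====
-- Pre_ keeps t ≤ 0 (A returns '' untouched) and the game's domain n ≥ 2, 1 ≤ p ≤ m, where A
-- always terminates.  Outside it A divides by zero (m = 0), loops forever (n ≤ 1 with the first
-- needed position > 0, or p-1 not a residue of player % m), and the only inputs there on which A
-- still returns — negative m with m < p-1 ≤ 0 (positions picked by Python's negative-divisor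
-- modulo convention), and n ≤ 1 with t = 1, p = 1 — are accidental corners no caller of this
-- game would specify; B does the natural thing there.
def Pre_solution (n : Int) (t : Int) (m : Int) (p : Int) : Prop :=
  t ≤ 0 ∨ (2 ≤ n ∧ 1 ≤ m ∧ 1 ≤ p ∧ p ≤ m)
instance (n : Int) (t : Int) (m : Int) (p : Int) : Decidable (Pre_solution n t m p) := by
  unfold Pre_solution; infer_instance

def pvWitness_solution : Int × Int × Int × Int := (2, 5, 2, 1)

def Spec_solution (n : Int) (t : Int) (m : Int) (p : Int) (out : String) : Prop := out = solution_alt n t m p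
instance (n : Int) (t : Int) (m : Int) (p : Int) (out : String) : Decidable (Spec_solution n t m p out) := by unfold Spec_solution; infer_instance

-- ===== CLAIM (what is proved, stated in full; the proofs are below) =====
def Claim_equal_solution : Prop := ∀ (n : Int) (t : Int) (m : Int) (p : Int), Dom_solution n t m p → Pre_solution n t m p → Spec_solution n t m p (solution n t m p)

-- ===== LEMMAS AND PROOFS =====

-- digit character: str(d) for d < 10, chr(55+d) otherwise
def pvDC (d : Nat) : Char := if d < 10 then Char.ofNat (48 + d) else Char.ofNat (55 + d)

-- big-endian digit list of k in base b (0 has the single digit 0)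
def pvDL (b k : Nat) : List Nat := if k = 0 then [0] else (Nat.digits b k).reverse

-- char digits of k, the stream of 0,1,…,N-1 concatenated, and the stream char at index g
def pvW (b k : Nat) : List Char := (pvDL b k).map pvDC

def pvD (b N : Nat) : List Char := (List.range N).flatMap (pvW b)

def pvSC (b g : Nat) : Char := (pvD b (g + 1)).getD g ' '

-- first number with d digits, and how many d-digit numbers there are
def pvFirstN (b d : Nat) : Nat := if d = 1 then 0 else b ^ (d - 1)

def pvCountN (b d : Nat) : Nat := b ^ d - pvFirstN b d

-- Nat mirror of pvEnc
def pvEncN (d : Nat) : Int ⊕ Char := if 10 ≤ d then Sum.inr (Char.ofNat (55 + d)) else Sum.inl (d : Int)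

lemma pvDL_ne_nil (b k : Nat) : pvDL b k ≠ [] := by
  unfold pvDL; split
  · simp
  · simpa [Nat.digits_ne_nil_iff_ne_zero] using ‹¬ k = 0›

lemma pvW_len_pos (b k : Nat) : 1 ≤ (pvW b k).length := by
  have := pvDL_ne_nil b k
  simp [pvW]
  exact List.length_pos_iff.2 this

lemma pvD_succ (b N : Nat) : pvD b (N + 1) = pvD b N ++ pvW b N := by
  simp [pvD, List.range_succ]

lemma pvD_add (b N j : Nat) : ∃ s, pvD b (N + j) = pvD b N ++ s := by
  induction j with
  | zero => exact ⟨[], by simp⟩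
  | succ j ih =>
    obtain ⟨s, hs⟩ := ih
    exact ⟨s ++ pvW b (N + j), by rw [← Nat.add_assoc, pvD_succ, hs, List.append_assoc]⟩

lemma pvD_prefix {b N M : Nat} (h : N ≤ M) : ∃ s, pvD b M = pvD b N ++ s := by
  obtain ⟨j, rfl⟩ := Nat.exists_eq_add_of_le h
  exact pvD_add b N j

lemma pvD_len_ge (b N : Nat) : N ≤ (pvD b N).length := by
  induction N with
  | zero => simp
  | succ N ih =>
    rw [pvD_succ]
    have := pvW_len_pos b N
    simp only [List.length_append]
    omega

-- any long-enough prefix of the stream has pvSC at index g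
lemma pvSC_spec (b N g : Nat) (h : g < (pvD b N).length) : (pvD b N).getD g ' ' = pvSC b g := by
  unfold pvSC
  rcases Nat.le_total N (g + 1) with hle | hle
  · obtain ⟨s, hs⟩ := pvD_prefix (b := b) hle
    rw [hs, List.getD_append _ _ _ _ h]
  · obtain ⟨s, hs⟩ := pvD_prefix (b := b) hle
    have hg : g < (pvD b (g + 1)).length := Nat.lt_of_lt_of_le (Nat.lt_succ_self g) (pvD_len_ge b (g + 1))
    rw [hs, List.getD_append _ _ _ _ hg]

-- the char at stream position |pvD b num| + pos is the pos-th char of num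
lemma pvSC_at (b num pos : Nat) (h : pos < (pvW b num).length) :
    pvSC b ((pvD b num).length + pos) = (pvW b num).getD pos ' ' := by
  have hlen : (pvD b num).length + pos < (pvD b (num + 1)).length := by
    rw [pvD_succ]; simp only [List.length_append]; omega
  rw [← pvSC_spec b (num + 1) _ hlen, pvD_succ, List.getD_append_right _ _ _ _ (Nat.le_add_right _ _)]
  simp

-- length of the digit list inside block d
lemma pvDL_len {b d k : Nat} (hb : 2 ≤ b) (hd : 1 ≤ d) (h1 : pvFirstN b d ≤ k) (h2 : k < b ^ d) :
    (pvDL b k).length = d := by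
  by_cases hk : k = 0
  · subst hk
    by_cases hd1 : d = 1
    · simp [pvDL, hd1]
    · exfalso
      unfold pvFirstN at h1
      rw [if_neg hd1] at h1
      have : 1 ≤ b ^ (d - 1) := Nat.one_le_pow _ _ (by omega)
      omega
  · simp only [pvDL, if_neg hk, List.length_reverse]
    have hub : (Nat.digits b k).length ≤ d := (Nat.digits_length_le_iff hb k).2 h2
    have hlb : 1 ≤ (Nat.digits b k).length :=
      List.length_pos_iff.2 ((Nat.digits_ne_nil_iff_ne_zero (b := b) (n := k)).2 hk)
    by_cases hd1 : d = 1
    · omega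
    · unfold pvFirstN at h1
      rw [if_neg hd1] at h1
      have hlb2 : ¬ (Nat.digits b k).length ≤ d - 1 := by
        intro hc
        have := (Nat.digits_length_le_iff hb k).1 hc
        omega
      omega

-- pvD length over a run of constant-length numbers
lemma pvD_len_const (b a d : Nat) :
    ∀ j, (∀ i, i < j → (pvW b (a + i)).length = d) →
      (pvD b (a + j)).length = (pvD b a).length + j * d := by
  intro j
  induction j with
  | zero => simp
  | succ j ih =>
    intro h
    rw [← Nat.add_assoc, pvD_succ, List.length_append, ih (fun i hi => h i (by omega)), h j (by omega)]
    ring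

lemma pvFirstN_le_pow (b d : Nat) (hb : 2 ≤ b) : pvFirstN b d ≤ b ^ d := by
  unfold pvFirstN
  split
  · exact Nat.zero_le _
  · exact Nat.pow_le_pow_right (by omega) (Nat.sub_le d 1)

lemma pvFirstN_succ (b d : Nat) (hb : 2 ≤ b) (hd : 1 ≤ d) :
    pvFirstN b (d + 1) = pvFirstN b d + pvCountN b d := by
  have h1 : pvFirstN b (d + 1) = b ^ d := by
    unfold pvFirstN
    rw [if_neg (by omega : ¬ d + 1 = 1), Nat.add_sub_cancel]
  have h2 := pvFirstN_le_pow b d hb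
  unfold pvCountN
  omega

lemma pvW_len_block {b d k : Nat} (hb : 2 ≤ b) (hd : 1 ≤ d) (h1 : pvFirstN b d ≤ k) (h2 : k < b ^ d) :
    (pvW b k).length = d := by
  simp [pvW, pvDL_len hb hd h1 h2]

lemma pvCountN_pos (b d : Nat) (hb : 2 ≤ b) (hd : 1 ≤ d) : 1 ≤ pvCountN b d := by
  unfold pvCountN pvFirstN
  split
  · have : 1 ≤ b ^ d := Nat.one_le_pow _ _ (by omega)
    omega
  · have : b ^ (d - 1) < b ^ d := Nat.pow_lt_pow_right (by omega) (by omega)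
    omega

lemma pvCountN_succ (b d : Nat) (hd : 1 ≤ d) :
    pvCountN b (d + 1) = pvFirstN b (d + 1) * (b - 1) := by
  have h1 : pvFirstN b (d + 1) = b ^ d := by
    unfold pvFirstN
    rw [if_neg (by omega : ¬ d + 1 = 1), Nat.add_sub_cancel]
  unfold pvCountN
  rw [h1, pow_succ, Nat.mul_sub, Nat.mul_one]

lemma pvBlockLen (b d : Nat) (hb : 2 ≤ b) (hd : 1 ≤ d) :
    (pvD b (pvFirstN b (d + 1))).length = (pvD b (pvFirstN b d)).length + pvCountN b d * d := by
  rw [pvFirstN_succ b d hb hd]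
  refine pvD_len_const b (pvFirstN b d) d (pvCountN b d) (fun i hi => ?_)
  have h1 := pvFirstN_le_pow b d hb
  have h2 : pvFirstN b d + i < b ^ d := by
    unfold pvCountN at hi
    omega
  exact pvW_len_block hb hd (Nat.le_add_right _ _) h2

-- B loop invariant, phrased over Nat state and executed over Int
lemma pvDigitLoop_spec (b : Nat) (hb : 2 ≤ b) (g : Nat) :
    ∀ (fuel d : Nat), 1 ≤ d → (pvD b (pvFirstN b d)).length ≤ g →
      g + 1 ≤ fuel + (pvD b (pvFirstN b d)).length →
      ∃ d', 1 ≤ d' ∧ (pvD b (pvFirstN b d')).length ≤ g ∧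
        g < (pvD b (pvFirstN b d')).length + pvCountN b d' * d' ∧
        pvDigitLoop (b : Int) (g : Int) fuel (d : Int) ((pvD b (pvFirstN b d)).length : Int)
            (pvFirstN b d : Int) (pvCountN b d : Int) =
          ((d' : Int), ((pvD b (pvFirstN b d')).length : Int), (pvFirstN b d' : Int), (pvCountN b d' : Int)) := by
  intro fuel
  induction fuel with
  | zero =>
    intro d hd hle hfuel
    omega
  | succ fuel ih =>
    intro d hd hle hfuel
    by_cases hc : (pvD b (pvFirstN b d)).length + pvCountN b d * d ≤ g
    · -- the loop runs once more, moving to block d+1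
      have hcpos := pvCountN_pos b d hb hd
      have hlen1 := pvBlockLen b d hb hd
      have hcd : 1 ≤ pvCountN b d * d := Nat.mul_le_mul hcpos hd
      have hstep : pvDigitLoop (b : Int) (g : Int) (fuel + 1) (d : Int)
            ((pvD b (pvFirstN b d)).length : Int) (pvFirstN b d : Int) (pvCountN b d : Int) =
          pvDigitLoop (b : Int) (g : Int) fuel ((d + 1 : Nat) : Int)
            ((pvD b (pvFirstN b (d + 1))).length : Int) (pvFirstN b (d + 1) : Int)
            (pvCountN b (d + 1) : Int) := by
        have e1 : (d : Int) + 1 = ((d + 1 : Nat) : Int) := by push_cast; ring_nf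
        have e2 : ((pvD b (pvFirstN b d)).length : Int) + (pvCountN b d : Int) * (d : Int) =
            ((pvD b (pvFirstN b (d + 1))).length : Int) := by
          rw [hlen1]; push_cast; ring
        have e3 : (pvFirstN b d : Int) + (pvCountN b d : Int) = (pvFirstN b (d + 1) : Int) := by
          rw [pvFirstN_succ b d hb hd]; push_cast; ring
        have hb1 : ((b - 1 : Nat) : Int) = (b : Int) - 1 := by omega
        have e4 : ((pvFirstN b d : Int) + (pvCountN b d : Int)) * ((b : Int) - 1) =
            (pvCountN b (d + 1) : Int) := by
          rw [e3, pvCountN_succ b d hd, Nat.cast_mul, hb1]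
        rw [pvDigitLoop, if_pos (by omega), e4, e3, e2, e1]
      rw [hstep]
      exact ih (d + 1) (by omega) (by omega) (by omega)
    · refine ⟨d, hd, hle, by omega, ?_⟩
      rw [pvDigitLoop, if_neg (by omega)]

-- digit extraction: the pos-th (big-endian) char of k
lemma pvW_getD (b k pos : Nat) (hb : 2 ≤ b) (h : pos < (pvW b k).length) :
    (pvW b k).getD pos ' ' = pvDC (k / b ^ ((pvW b k).length - 1 - pos) % b) := by
  have hlen : pos < (pvDL b k).length := by simpa [pvW] using h
  have h1 : (pvW b k).getD pos ' ' = pvDC ((pvDL b k)[pos]) := by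
    rw [List.getD_eq_getElem _ _ h]
    simp [pvW]
  rw [h1]
  have hW : (pvW b k).length = (pvDL b k).length := by simp [pvW]
  by_cases hk : k = 0
  · subst hk
    have : (pvDL b 0) = [0] := by simp [pvDL]
    simp_all
  · have hDL : pvDL b k = (Nat.digits b k).reverse := by simp [pvDL, hk]
    have hlen2 : pos < (Nat.digits b k).reverse.length := by rw [← hDL]; exact hlen
    have hlen3 : (Nat.digits b k).length - 1 - pos < (Nat.digits b k).length := by
      simp only [List.length_reverse] at hlen2
      omega
    have h2 : (pvDL b k)[pos] = (Nat.digits b k)[(Nat.digits b k).length - 1 - pos] := by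
      rw [List.getElem_of_eq hDL hlen, List.getElem_reverse]
    rw [h2, ← List.getD_eq_getElem _ 0 hlen3, Nat.getD_digits k _ hb, hW, hDL]
    simp

-- str(d) for a single decimal digit
lemma pvToChars_digit (d : Nat) (h : d < 10) : PySem.Int.toChars (d : Int) = [Char.ofNat (48 + d)] := by
  interval_cases d <;> decide

lemma pvStrOf_pvEncN (d : Nat) : pvStrOf (pvEncN d) = [pvDC d] := by
  unfold pvStrOf pvEncN pvDC
  by_cases h : d < 10
  · rw [if_neg (by omega), if_pos h]
    exact pvToChars_digit d h
  · rw [if_pos (by omega), if_neg h]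

lemma pvEnc_natCast (d : Nat) : pvEnc (d : Int) = pvEncN d := by
  unfold pvEnc pvEncN
  by_cases h : 10 ≤ d
  · have h55 : ((55 : Int) + (d : Int)).toNat = 55 + d := by omega
    rw [if_pos (by exact_mod_cast h), if_pos h, h55]
  · rw [if_neg (by exact_mod_cast h), if_neg h]

lemma pvDigitAt_eq (b : Nat) (hb : 2 ≤ b) (g : Nat) :
    pvDigitAt (b : Int) (g : Int) = [pvSC b g] := by
  have hf1 : pvFirstN b 1 = 0 := by unfold pvFirstN; simp
  have hc1 : pvCountN b 1 = b := by unfold pvCountN; rw [hf1, pow_one]; omega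
  have hl1 : (pvD b 0).length = 0 := by simp [pvD]
  have hl1' : (pvD b (pvFirstN b 1)).length = 0 := by rw [hf1]; exact hl1
  obtain ⟨d', hd', hle', hlt', heq⟩ :=
    pvDigitLoop_spec b hb g (g + 2) 1 (le_refl 1) (by omega) (by omega)
  simp only [hf1, hc1, hl1, Nat.cast_zero, Nat.cast_one] at heq
  -- abbreviations for the final state
  set L' : Nat := (pvD b (pvFirstN b d')).length with hL'
  set F' : Nat := pvFirstN b d' with hF'
  set C' : Nat := pvCountN b d' with hC'
  set iN : Nat := g - L' with hiN
  set posN : Nat := iN % d' with hposN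
  set numN : Nat := F' + iN / d' with hnumN
  have hpos_lt : posN < d' := Nat.mod_lt iN (by omega)
  have hdivlt : iN / d' < C' := (Nat.div_lt_iff_lt_mul (by omega)).2 (by omega)
  have hFpow := pvFirstN_le_pow b d' hb
  have hnum_lt : numN < b ^ d' := by
    have : C' = b ^ d' - F' := hC'
    omega
  have hwlen : (pvW b numN).length = d' := pvW_len_block hb hd' (Nat.le_add_right _ _) hnum_lt
  -- position of numN's digits in the stream
  have hplen : (pvD b numN).length = L' + (iN / d') * d' := by
    rw [hnumN]
    refine pvD_len_const b F' d' (iN / d') (fun i hi => ?_)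
    exact pvW_len_block hb hd' (Nat.le_add_right _ _) (by omega)
  have hsplit : g = (pvD b numN).length + posN := by
    have h1 : iN / d' * d' + iN % d' = iN := Nat.div_add_mod' iN d'
    rw [hplen]
    omega
  have hkey : pvSC b g = pvDC (numN / b ^ (d' - 1 - posN) % b) := by
    rw [hsplit, pvSC_at b numN posN (by omega), pvW_getD b numN posN hb (by omega), hwlen]
  -- now evaluate the port
  unfold pvDigitAt
  simp only [Int.toNat_natCast]
  rw [heq]
  simp only
  have hgl : (g : Int) - (L' : Int) = (iN : Int) := by omega
  have hexp : ((d' : Int) - 1 - ((iN : Nat) % d' : Nat)).toNat = d' - 1 - posN := by omega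
  rw [hgl, PySem.Int.floordiv_natCast, PySem.Int.mod_natCast, hexp]
  have hnumc : (F' : Int) + ((iN / d' : Nat) : Int) = (numN : Int) := by push_cast [hnumN]; ring
  have hpowc : (b : Int) ^ (d' - 1 - posN) = ((b ^ (d' - 1 - posN) : Nat) : Int) := by push_cast; ring
  rw [hnumc, hpowc, PySem.Int.floordiv_natCast, PySem.Int.mod_natCast]
  set dg : Nat := numN / b ^ (d' - 1 - posN) % b with hdg
  by_cases h10 : dg < 10
  · rw [if_pos (by exact_mod_cast h10), pvToChars_digit dg h10, hkey, pvDC, if_pos h10]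
  · rw [if_neg (by exact_mod_cast h10), hkey, pvDC, if_neg h10]
    have : ((55 : Int) + (dg : Int)).toNat = 55 + dg := by omega
    rw [this]

lemma pvCfLoop_eq (b : Nat) (hb : 2 ≤ b) :
    ∀ (fuel k : Nat) (acc : List (Int ⊕ Char)), k ≤ fuel →
      pvCfLoop fuel (k : Int) (b : Int) acc = acc ++ (Nat.digits b k).map pvEncN := by
  intro fuel
  induction fuel with
  | zero =>
    intro k acc hk
    have : k = 0 := by omega
    subst this
    simp [pvCfLoop]
  | succ fuel ih =>
    intro k acc hk
    by_cases hk0 : k = 0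
    · subst hk0
      simp [pvCfLoop]
    · have h1 : (0 : Int) < (k : Int) := by exact_mod_cast Nat.pos_of_ne_zero hk0
      rw [pvCfLoop, if_pos h1, PySem.Int.mod_natCast, PySem.Int.floordiv_natCast, pvEnc_natCast]
      have hdiv : k / b ≤ fuel := by
        have := Nat.div_lt_self (Nat.pos_of_ne_zero hk0) (by omega : 1 < b)
        omega
      rw [ih (k / b) _ hdiv, Nat.digits_def' (by omega : 1 < b) (Nat.pos_of_ne_zero hk0)]
      simp

lemma pvConvertFormat_eq (b : Nat) (hb : 2 ≤ b) (k : Nat) :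
    pvConvertFormat (k : Int) (b : Int) = (pvDL b k).map pvEncN := by
  unfold pvConvertFormat
  have hT : ((k : Int)).toNat = k := Int.toNat_natCast k
  rw [hT, pvCfLoop_eq b hb (k + 1) k [] (by omega), List.nil_append]
  by_cases hk : k = 0
  · subst hk
    simp [pvDL, pvEncN]
  · have hne : (Nat.digits b k).map pvEncN ≠ [] := by
      simp [Nat.digits_ne_nil_iff_ne_zero, hk]
    rw [if_pos hne, ← List.map_reverse]
    simp [pvDL, hk]

-- the A-side inner loop, under the window invariant
lemma pvInner_spec (b : Nat) (m p t : Int) (mN r tN : Nat)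
    (hm : m = (mN : Int)) (hmN : 1 ≤ mN) (hp : p - 1 = (r : Int)) (hr : r < mN)
    (ht : t = (tN : Int)) :
    ∀ (ds : List (Int ⊕ Char)) (player j : Nat) (answer : List Char),
      answer = (List.range j).map (fun k => pvSC b (r + k * mN)) →
      j < tN →
      player ≤ r + j * mN → r + j * mN < player + mN →
      (∀ q (hq : q < ds.length), pvStrOf ds[q] = [pvSC b (player + q)]) →
      (∃ pl, pvInner m p t ds answer (player : Int) =
          ((List.range tN).map (fun k => pvSC b (r + k * mN)), pl)) ∨
      (∃ j', j' < tN ∧ player + ds.length ≤ r + j' * mN ∧ r + j' * mN < player + ds.length + mN ∧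
        pvInner m p t ds answer (player : Int) =
          ((List.range j').map (fun k => pvSC b (r + k * mN)), ((player + ds.length : Nat) : Int))) := by
  intro ds
  induction ds with
  | nil =>
    intro player j answer hans hj hw1 hw2 hch
    refine Or.inr ⟨j, hj, by simpa using hw1, by simpa using hw2, ?_⟩
    simp [pvInner, hans]
  | cons i rest ih =>
    intro player j answer hans hj hw1 hw2 hch
    have hch0 : pvStrOf i = [pvSC b player] := by simpa using hch 0 (by simp)
    have hch' : ∀ q (hq : q < rest.length), pvStrOf rest[q] = [pvSC b (player + 1 + q)] := by
      intro q hq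
      have h := hch (q + 1) (by simpa using Nat.succ_lt_succ hq)
      simp only [List.getElem_cons_succ] at h
      have harg : player + (q + 1) = player + 1 + q := by omega
      rw [harg] at h
      exact h
    have hlencons : (i :: rest).length = rest.length + 1 := by simp
    by_cases hmatch : player % mN = r
    · -- this stream position is selected; it is exactly position r + j*mN
      have hcond : PySem.Int.mod (player : Int) m = p - 1 := by
        rw [hm, hp, PySem.Int.mod_natCast]
        exact_mod_cast hmatch
      have hpj : player = r + j * mN := by
        have hq0 : mN * (player / mN) + player % mN = player := Nat.div_add_mod player mN
        set q := player / mN with hqdef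
        have hq : player = mN * q + r := by omega
        have hq1 : q ≤ j := by
          have h1 : mN * q ≤ mN * j := by
            have : j * mN = mN * j := Nat.mul_comm j mN
            omega
          exact Nat.le_of_mul_le_mul_left h1 (by omega)
        have hq2 : j < q + 1 := by
          have h1 : mN * j < mN * (q + 1) := by
            have e1 : j * mN = mN * j := Nat.mul_comm j mN
            have e2 : mN * (q + 1) = mN * q + mN := by ring
            omega
          exact Nat.lt_of_mul_lt_mul_left h1
        have : q = j := by omega
        rw [hq, this, Nat.mul_comm]
        omega
      have hans' : answer ++ pvStrOf i =
          (List.range (j + 1)).map (fun k => pvSC b (r + k * mN)) := by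
        rw [hch0, hans, List.range_succ, List.map_append, List.map_singleton, hpj]
      have hlen' : ((answer ++ pvStrOf i).length : Int) = ((j + 1 : Nat) : Int) := by
        rw [hans']
        simp
      by_cases hbreak : j + 1 = tN
      · refine Or.inl ⟨(player : Int), ?_⟩
        simp only [pvInner, if_pos hcond]
        rw [if_pos (by rw [hlen', hbreak, ht])]
        rw [hans', hbreak]
      · have hjlt : j + 1 < tN := by omega
        have hne : ¬ ((answer ++ pvStrOf i).length : Int) = t := by
          rw [hlen', ht]
          exact_mod_cast fun hc => hbreak (by exact_mod_cast hc)
        have hsm : (j + 1) * mN = j * mN + mN := by ring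
        have hrec := ih (player + 1) (j + 1) _ hans' hjlt (by omega) (by omega) hch'
        have hcast : ((player : Int) + 1) = ((player + 1 : Nat) : Int) := by push_cast; ring
        simp only [pvInner, if_pos hcond]
        rw [if_neg hne, hcast]
        rcases hrec with ⟨pl, hpl⟩ | ⟨j', h1, h2, h3, h4⟩
        · exact Or.inl ⟨pl, hpl⟩
        · refine Or.inr ⟨j', h1, by omega, by omega, ?_⟩
          rw [h4]
          congr 2
          omega
    · -- not selected: player is strictly before position r + j*mN
      have hcond : ¬ PySem.Int.mod (player : Int) m = p - 1 := by
        rw [hm, hp, PySem.Int.mod_natCast]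
        exact_mod_cast fun hc => hmatch (by exact_mod_cast hc)
      have hlt : player < r + j * mN := by
        rcases Nat.lt_or_ge player (r + j * mN) with h | h
        · exact h
        · exfalso
          have : player = r + j * mN := by omega
          rw [this, Nat.add_mul_mod_self_right, Nat.mod_eq_of_lt hr] at hmatch
          exact hmatch rfl
      have hcast : ((player : Int) + 1) = ((player + 1 : Nat) : Int) := by push_cast; ring
      have hrec := ih (player + 1) j answer hans hj (by omega) (by omega) hch'
      simp only [pvInner, if_neg hcond]
      rw [hcast]
      rcases hrec with ⟨pl, hpl⟩ | ⟨j', h1, h2, h3, h4⟩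
      · exact Or.inl ⟨pl, hpl⟩
      · refine Or.inr ⟨j', h1, by omega, by omega, ?_⟩
        rw [h4]
        congr 2
        omega

-- the A-side outer loop
lemma pvOuter_spec (b : Nat) (n m p t : Int) (mN r tN : Nat)
    (hn : n = (b : Int)) (hb : 2 ≤ b)
    (hm : m = (mN : Int)) (hmN : 1 ≤ mN) (hp : p - 1 = (r : Int)) (hr : r < mN)
    (ht : t = (tN : Int)) (htN : 1 ≤ tN) :
    ∀ (fuel num j player : Nat) (answer : List Char),
      player = (pvD b num).length →
      answer = (List.range j).map (fun k => pvSC b (r + k * mN)) →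
      j < tN →
      player ≤ r + j * mN → r + j * mN < player + mN →
      r + (tN - 1) * mN + 2 ≤ fuel + num →
      pvOuter n m p t fuel (num : Int) answer (player : Int) =
        (List.range tN).map (fun k => pvSC b (r + k * mN)) := by
  intro fuel
  induction fuel with
  | zero =>
    intro num j player answer hplayer hans hj hw1 hw2 hfuel
    exfalso
    have h1 : num ≤ player := hplayer ▸ pvD_len_ge b num
    have h2 : j * mN ≤ (tN - 1) * mN := Nat.mul_le_mul_right mN (by omega)
    omega
  | succ fuel ih =>
    intro num j player answer hplayer hans hj hw1 hw2 hfuel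
    have hanslen : ((answer.length : Int) < t) := by
      rw [hans, ht]
      simp only [List.length_map, List.length_range]
      exact_mod_cast hj
    have hds : pvConvertFormat (num : Int) n = (pvDL b num).map pvEncN := by
      rw [hn]
      exact pvConvertFormat_eq b hb num
    have hdslen : (pvConvertFormat (num : Int) n).length = (pvW b num).length := by
      rw [hds]
      simp [pvW]
    have hch : ∀ q (hq : q < (pvConvertFormat (num : Int) n).length),
        pvStrOf (pvConvertFormat (num : Int) n)[q] = [pvSC b (player + q)] := by
      intro q hq
      have hq' : q < (pvDL b num).length := by rw [← List.length_map (f := pvEncN)]; rw [← hds]; exact hq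
      have h1 : (pvConvertFormat (num : Int) n)[q] = pvEncN ((pvDL b num)[q]) := by
        rw [List.getElem_of_eq hds hq, List.getElem_map]
      have hqW : q < (pvW b num).length := by simpa [pvW] using hq'
      rw [h1, pvStrOf_pvEncN, hplayer, pvSC_at b num q hqW, List.getD_eq_getElem _ _ hqW]
      simp [pvW]
    rw [pvOuter, if_pos hanslen]
    have hrec := pvInner_spec b m p t mN r tN hm hmN hp hr ht
      (pvConvertFormat (num : Int) n) player j answer hans hj hw1 hw2 hch
    rcases hrec with ⟨pl, hpl⟩ | ⟨j', h1, h2, h3, h4⟩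
    · rw [hpl]
      have hstop : ¬ (((((List.range tN).map (fun k => pvSC b (r + k * mN))).length : Nat) : Int) < t) := by
        simp only [List.length_map, List.length_range]
        rw [ht]
        omega
      cases fuel with
      | zero => rfl
      | succ fuel' => rw [pvOuter, if_neg hstop]
    · rw [h4]
      have hplayer' : player + (pvConvertFormat (num : Int) n).length = (pvD b (num + 1)).length := by
        rw [hdslen, hplayer, pvD_succ, List.length_append]
      have hcastnum : ((num : Int) + 1) = ((num + 1 : Nat) : Int) := by push_cast; ring
      rw [hcastnum]
      exact ih (num + 1) j' (player + (pvConvertFormat (num : Int) n).length) _ hplayer' rfl h1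
        h2 h3 (by omega)


lemma pvFlattenSingleton {α β : Type} (l : List α) (g : α → β) :
    (l.map (fun x => [g x])).flatten = l.map g := by
  induction l with
  | nil => rfl
  | cons a l ih => simp [ih]

-- ===== VERDICT (by name: the statement is the Claim_ definition above) =====
theorem solution_spec : Claim_equal_solution := by
  intro n t m p _hdom hpre
  unfold Spec_solution solution solution_alt
  by_cases ht0 : t ≤ 0
  · -- no output requested: both sides are the empty string
    have hr : PySem.List.pyRange 0 t 1 = [] := by
      simp [PySem.List.pyRange]
      omega
    have hfuel : t.toNat * m.toNat + 2 = (t.toNat * m.toNat + 1) + 1 := rfl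
    rw [hfuel, pvOuter, if_neg (by simp; omega), hr]
    rfl
  · -- the game's domain: n ≥ 2, 1 ≤ p ≤ m, t ≥ 1
    have hgame : 2 ≤ n ∧ 1 ≤ m ∧ 1 ≤ p ∧ p ≤ m := by
      rcases hpre with h | h
      · omega
      · exact h
    obtain ⟨hn2, hm1, hp1, hpm⟩ := hgame
    set b : Nat := n.toNat with hbdef
    set mN : Nat := m.toNat with hmNdef
    set tN : Nat := t.toNat with htNdef
    set r : Nat := (p - 1).toNat with hrdef
    have hb : 2 ≤ b := by omega
    have hn : n = (b : Int) := by omega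
    have hm : m = (mN : Int) := by omega
    have hmN : 1 ≤ mN := by omega
    have ht : t = (tN : Int) := by omega
    have htN : 1 ≤ tN := by omega
    have hp : p - 1 = (r : Int) := by omega
    have hrlt : r < mN := by omega
    -- A's loop produces the selected stream characters
    have hmul : tN * mN = (tN - 1) * mN + mN := by
      have e : tN = (tN - 1) + 1 := by omega
      calc tN * mN = ((tN - 1) + 1) * mN := by rw [← e]
        _ = (tN - 1) * mN + mN := by ring
    have hA : pvOuter n m p t (t.toNat * m.toNat + 2) 0 [] 0 =
        (List.range tN).map (fun k => pvSC b (r + k * mN)) := by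
      have := pvOuter_spec b n m p t mN r tN hn hb hm hmN hp hrlt ht htN
        (tN * mN + 2) 0 0 0 [] (by simp [pvD]) (by simp) (by omega) (by omega)
        (by simpa using hrlt) (by omega)
      simpa using this
    rw [hA]
    -- B maps the closed-form digit over the requested indices
    rw [ht, PySem.List.pyRange_zero_natCast, List.map_map]
    have hBk : ∀ k : Nat, pvDigitAt n (p - 1 + (k : Int) * m) = [pvSC b (r + k * mN)] := by
      intro k
      have harg : p - 1 + (k : Int) * m = ((r + k * mN : Nat) : Int) := by
        rw [hp, hm]
        push_cast
        ring
      rw [harg, hn]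
      exact pvDigitAt_eq b hb (r + k * mN)
    have hmapeq : (List.range tN).map ((fun k => pvDigitAt n (p - 1 + k * m)) ∘ (fun k : Nat => (k : Int))) =
        (List.range tN).map (fun k : Nat => [pvSC b (r + k * mN)]) := by
      refine List.map_congr_left (fun k _ => ?_)
      exact hBk k
    rw [hmapeq, pvFlattenSingleton]
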